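-- pv_equiv track=rewrite | github.com/idrissrasheed/snowflake-blackrock-evm | src/agent.py | generate_value_driver_map
-- ===== SOURCE A (Python) =====
-- def generate_value_driver_map(pain_points):
--     """
--     Maps the qualitative pain points into a formal, tabular Value Driver Map
--     used in elite Snowflake VE presentations.
--     Columns: [Pain Point, Value Lever, Financial Driver, Metric Impact]
--     """
--     driver_map = []
--
--     for pp in pain_points:
--         text = pp.lower()
--
--         # Performance/Batching -> Compute Elasticity
--         if any(word in text for word in ["slow", "time", "delay", "batch"]):
--             driver_map.append({
--                 "Pain Point": pp,
--                 "Value Lever": "Elastic Compute (Scale up/down instantly)",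
--                 "Financial Driver": "Revenue Enablement",
--                 "Metric Impact": "Faster simulations & Quicker time-to-market"
--             })
--
--         # Cost/Infra/Maintenance -> Cost Reduction
--         elif any(word in text for word in ["cost", "expensive", "overhead", "admin", "maintenance", "manage"]):
--             driver_map.append({
--                 "Pain Point": pp,
--                 "Value Lever": "Managed SaaS & Micro-partitioning",
--                 "Financial Driver": "Cost Reduction",
--                 "Metric Impact": "Lower storage footprints & Zero tuning labor"
--             })
--
--         # Sharing/Silos/Risk -> Risk Reduction
--         elif any(word in text for word in ["govern", "compliance", "silo", "secure", "protect", "risk", "share", "collaboration"]):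
--             driver_map.append({
--                 "Pain Point": pp,
--                 "Value Lever": "Secure Data Sharing (No copy)",
--                 "Financial Driver": "Risk Reduction",
--                 "Metric Impact": "Eliminated FTP ingestion overhead & High governance"
--             })
--
--         # ML/AI/Scaling -> Revenue Enablement
--         elif any(word in text for word in ["ai", "model", "scale", "growth", "volume"]):
--              driver_map.append({
--                 "Pain Point": pp,
--                 "Value Lever": "Snowpark / Unlimited Concurrency",
--                 "Financial Driver": "Revenue Enablement",
--                 "Metric Impact": "Unblocked quant teams & Higher model volume"
--             })
--
--         else:
--             # Fallback
--             driver_map.append({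
--                 "Pain Point": pp,
--                 "Value Lever": "Data Cloud Consolidation",
--                 "Financial Driver": "Cost Reduction",
--                 "Metric Impact": "Consolidated tool sprawl"
--             })
--
--     return driver_map
-- ===== SOURCE B (Python) =====
-- KEYWORD_GROUPS = [
--     ["slow", "time", "delay", "batch"],
--     ["cost", "expensive", "overhead", "admin", "maintenance", "manage"],
--     ["govern", "compliance", "silo", "secure", "protect", "risk", "share", "collaboration"],
--     ["ai", "model", "scale", "growth", "volume"],
-- ]
--
-- # flat keyword -> priority index
-- KEYWORDS = [(w, i) for i, kws in enumerate(KEYWORD_GROUPS) for w in kws]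
--
-- TABLE = [
--     ("Elastic Compute (Scale up/down instantly)", "Revenue Enablement",
--      "Faster simulations & Quicker time-to-market"),
--     ("Managed SaaS & Micro-partitioning", "Cost Reduction",
--      "Lower storage footprints & Zero tuning labor"),
--     ("Secure Data Sharing (No copy)", "Risk Reduction",
--      "Eliminated FTP ingestion overhead & High governance"),
--     ("Snowpark / Unlimited Concurrency", "Revenue Enablement",
--      "Unblocked quant teams & Higher model volume"),
--     ("Data Cloud Consolidation", "Cost Reduction",
--      "Consolidated tool sprawl"),
-- ]
--
--
-- def generate_value_driver_map(pain_points):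
--     # pass 1: category = minimum priority among all matching keywords (4 = fallback)
--     cats = [min([4] + [i for w, i in KEYWORDS if w in pp.lower()])
--             for pp in pain_points]
--     # pass 2: build rows from the category table
--     return [{"Pain Point": pp,
--              "Value Lever": TABLE[c][0],
--              "Financial Driver": TABLE[c][1],
--              "Metric Impact": TABLE[c][2]}
--             for pp, c in zip(pain_points, cats)]
-- ===== Notes on version B (the rewrite author's own statement) =====
-- stated objective: alternative
-- what changed: Replaced the short-circuit if/elif keyword cascade by a flat keyword-to-priority index aggregated with min over all matches, then a second pass that builds rows by indexing a category table.
import Mathlib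
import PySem

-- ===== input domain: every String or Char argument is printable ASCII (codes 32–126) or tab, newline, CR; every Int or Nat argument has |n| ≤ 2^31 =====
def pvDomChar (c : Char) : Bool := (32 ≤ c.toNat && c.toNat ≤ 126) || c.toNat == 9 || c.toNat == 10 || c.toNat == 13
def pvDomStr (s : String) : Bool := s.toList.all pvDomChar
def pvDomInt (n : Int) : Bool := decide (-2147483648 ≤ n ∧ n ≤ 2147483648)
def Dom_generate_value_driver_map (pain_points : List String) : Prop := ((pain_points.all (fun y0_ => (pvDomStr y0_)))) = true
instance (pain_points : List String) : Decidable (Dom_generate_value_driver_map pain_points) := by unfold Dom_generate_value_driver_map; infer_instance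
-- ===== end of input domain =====

-- B replaces A's short-circuit if/elif keyword cascade by a flat keyword→priority index
-- aggregated with min over all matches, then a second pass building rows from a category
-- table (alternative decomposition; same cost).

-- ===== PORT A =====
def generate_value_driver_map (pain_points : List String) : List (List (String × String)) :=
  pain_points.foldl (fun driver_map pp =>
    let text := PySem.Str.lower pp
    if ["slow", "time", "delay", "batch"].any (fun w => PySem.Str.isIn w text) then
      driver_map ++ [[("Pain Point", pp),
        ("Value Lever", "Elastic Compute (Scale up/down instantly)"),
        ("Financial Driver", "Revenue Enablement"),
        ("Metric Impact", "Faster simulations & Quicker time-to-market")]]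
    else if ["cost", "expensive", "overhead", "admin", "maintenance", "manage"].any (fun w => PySem.Str.isIn w text) then
      driver_map ++ [[("Pain Point", pp),
        ("Value Lever", "Managed SaaS & Micro-partitioning"),
        ("Financial Driver", "Cost Reduction"),
        ("Metric Impact", "Lower storage footprints & Zero tuning labor")]]
    else if ["govern", "compliance", "silo", "secure", "protect", "risk", "share", "collaboration"].any (fun w => PySem.Str.isIn w text) then
      driver_map ++ [[("Pain Point", pp),
        ("Value Lever", "Secure Data Sharing (No copy)"),
        ("Financial Driver", "Risk Reduction"),
        ("Metric Impact", "Eliminated FTP ingestion overhead & High governance")]]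
    else if ["ai", "model", "scale", "growth", "volume"].any (fun w => PySem.Str.isIn w text) then
      driver_map ++ [[("Pain Point", pp),
        ("Value Lever", "Snowpark / Unlimited Concurrency"),
        ("Financial Driver", "Revenue Enablement"),
        ("Metric Impact", "Unblocked quant teams & Higher model volume")]]
    else
      driver_map ++ [[("Pain Point", pp),
        ("Value Lever", "Data Cloud Consolidation"),
        ("Financial Driver", "Cost Reduction"),
        ("Metric Impact", "Consolidated tool sprawl")]]) []

-- ===== PORT B =====
def pvGroups : List (List String) :=
  [["slow", "time", "delay", "batch"],
   ["cost", "expensive", "overhead", "admin", "maintenance", "manage"],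
   ["govern", "compliance", "silo", "secure", "protect", "risk", "share", "collaboration"],
   ["ai", "model", "scale", "growth", "volume"]]

-- KEYWORDS = [(w, i) for i, kws in enumerate(KEYWORD_GROUPS) for w in kws]
def pvKeywords : List (String × Nat) :=
  pvGroups.zipIdx.flatMap (fun g => g.1.map (fun w => (w, g.2)))

def pvTable : List (String × String × String) :=
  [("Elastic Compute (Scale up/down instantly)", "Revenue Enablement",
    "Faster simulations & Quicker time-to-market"),
   ("Managed SaaS & Micro-partitioning", "Cost Reduction",
    "Lower storage footprints & Zero tuning labor"),
   ("Secure Data Sharing (No copy)", "Risk Reduction",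
    "Eliminated FTP ingestion overhead & High governance"),
   ("Snowpark / Unlimited Concurrency", "Revenue Enablement",
    "Unblocked quant teams & Higher model volume"),
   ("Data Cloud Consolidation", "Cost Reduction",
    "Consolidated tool sprawl")]

-- min([4] + [i for w, i in KEYWORDS if w in pp.lower()])
def pvCategory (pp : String) : Nat :=
  (pvKeywords.filterMap (fun p =>
      if PySem.Str.isIn p.1 (PySem.Str.lower pp) then some p.2 else none)).foldl min 4

def pvRowOf (pp : String) (c : Nat) : List (String × String) :=
  let r := pvTable.getD c ("", "", "")
  [("Pain Point", pp), ("Value Lever", r.1),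
   ("Financial Driver", r.2.1), ("Metric Impact", r.2.2)]

def generate_value_driver_map_alt (pain_points : List String) : List (List (String × String)) :=
  let cats := pain_points.map pvCategory
  (pain_points.zip cats).map (fun q => pvRowOf q.1 q.2)

-- ===== PRECONDITION & SPEC =====
def Spec_generate_value_driver_map (pain_points : List String) (out : List (List (String × String))) : Prop := out = generate_value_driver_map_alt pain_points
instance (pain_points : List String) (out : List (List (String × String))) : Decidable (Spec_generate_value_driver_map pain_points out) := by unfold Spec_generate_value_driver_map; infer_instance

-- ===== CLAIM (what is proved, stated in full; the proofs are below) =====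
def Claim_equal_generate_value_driver_map : Prop := ∀ (pain_points : List String), Dom_generate_value_driver_map pain_points → Spec_generate_value_driver_map pain_points (generate_value_driver_map pain_points)

-- ===== LEMMAS AND PROOFS =====

-- min-fold over a constant-index block equals "min d i if any keyword matches, else d"
theorem pv_foldl_min_block (kws : List String) (i : Nat) (t : String) (d : Nat) :
    ((kws.map (fun w => (w, i))).filterMap (fun p =>
        if PySem.Str.isIn p.1 (PySem.Str.lower t) then some p.2 else none)).foldl min d
      = if kws.any (fun w => PySem.Str.isIn w (PySem.Str.lower t)) then min d i else d := by
  induction kws generalizing d with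
  | nil => simp
  | cons w rest ih =>
    by_cases h : PySem.Str.isIn w (PySem.Str.lower t) = true
    · simp only [List.map_cons, List.filterMap_cons, h, if_true, List.foldl_cons,
        List.any_cons, Bool.true_or, ih]
      by_cases h2 : (rest.any fun w => PySem.Str.isIn w (PySem.Str.lower t)) = true <;>
        simp [h2, Nat.min_assoc]
    · simp only [Bool.not_eq_true] at h
      simp only [List.map_cons, List.filterMap_cons, h, Bool.false_eq_true, if_false,
        List.any_cons, Bool.false_or, ih]

-- the min over the flat keyword index is the first-matching group index (4 = none)
theorem pvCategory_eq (pp : String) :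
    pvCategory pp =
      (if ["slow", "time", "delay", "batch"].any (fun w => PySem.Str.isIn w (PySem.Str.lower pp)) then 0
       else if ["cost", "expensive", "overhead", "admin", "maintenance", "manage"].any (fun w => PySem.Str.isIn w (PySem.Str.lower pp)) then 1
       else if ["govern", "compliance", "silo", "secure", "protect", "risk", "share", "collaboration"].any (fun w => PySem.Str.isIn w (PySem.Str.lower pp)) then 2
       else if ["ai", "model", "scale", "growth", "volume"].any (fun w => PySem.Str.isIn w (PySem.Str.lower pp)) then 3
       else 4) := by
  have e : pvKeywords =
      (["slow", "time", "delay", "batch"].map (fun w => (w, (0 : Nat))))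
      ++ ((["cost", "expensive", "overhead", "admin", "maintenance", "manage"].map (fun w => (w, (1 : Nat))))
      ++ ((["govern", "compliance", "silo", "secure", "protect", "risk", "share", "collaboration"].map (fun w => (w, (2 : Nat))))
      ++ (["ai", "model", "scale", "growth", "volume"].map (fun w => (w, (3 : Nat)))))) := by
    rfl
  unfold pvCategory
  rw [e]
  rw [List.filterMap_append, List.filterMap_append, List.filterMap_append,
      List.foldl_append, List.foldl_append, List.foldl_append]
  rw [pv_foldl_min_block, pv_foldl_min_block, pv_foldl_min_block, pv_foldl_min_block]
  split_ifs <;> rfl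

-- zip-with-map collapses to a single map
theorem pv_zip_map (l : List String) :
    (l.zip (l.map pvCategory)).map (fun q => pvRowOf q.1 q.2)
      = l.map (fun pp => pvRowOf pp (pvCategory pp)) := by
  induction l with
  | nil => rfl
  | cons h t ih => simp [ih]

-- accumulate-append fold is the map
theorem pv_foldl_map (pain_points : List String) (acc : List (List (String × String))) :
    pain_points.foldl (fun dm pp => dm ++ [pvRowOf pp (pvCategory pp)]) acc
      = acc ++ pain_points.map (fun pp => pvRowOf pp (pvCategory pp)) := by
  induction pain_points generalizing acc with
  | nil => simp
  | cons h t ih => simp [ih]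

-- A's per-element cascade step is exactly B's row
theorem pv_step_eq :
    (fun (driver_map : List (List (String × String))) pp =>
      let text := PySem.Str.lower pp
      if ["slow", "time", "delay", "batch"].any (fun w => PySem.Str.isIn w text) then
        driver_map ++ [[("Pain Point", pp),
          ("Value Lever", "Elastic Compute (Scale up/down instantly)"),
          ("Financial Driver", "Revenue Enablement"),
          ("Metric Impact", "Faster simulations & Quicker time-to-market")]]
      else if ["cost", "expensive", "overhead", "admin", "maintenance", "manage"].any (fun w => PySem.Str.isIn w text) then
        driver_map ++ [[("Pain Point", pp),
          ("Value Lever", "Managed SaaS & Micro-partitioning"),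
          ("Financial Driver", "Cost Reduction"),
          ("Metric Impact", "Lower storage footprints & Zero tuning labor")]]
      else if ["govern", "compliance", "silo", "secure", "protect", "risk", "share", "collaboration"].any (fun w => PySem.Str.isIn w text) then
        driver_map ++ [[("Pain Point", pp),
          ("Value Lever", "Secure Data Sharing (No copy)"),
          ("Financial Driver", "Risk Reduction"),
          ("Metric Impact", "Eliminated FTP ingestion overhead & High governance")]]
      else if ["ai", "model", "scale", "growth", "volume"].any (fun w => PySem.Str.isIn w text) then
        driver_map ++ [[("Pain Point", pp),
          ("Value Lever", "Snowpark / Unlimited Concurrency"),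
          ("Financial Driver", "Revenue Enablement"),
          ("Metric Impact", "Unblocked quant teams & Higher model volume")]]
      else
        driver_map ++ [[("Pain Point", pp),
          ("Value Lever", "Data Cloud Consolidation"),
          ("Financial Driver", "Cost Reduction"),
          ("Metric Impact", "Consolidated tool sprawl")]])
    = (fun driver_map pp => driver_map ++ [pvRowOf pp (pvCategory pp)]) := by
  funext acc pp
  rw [pvCategory_eq]
  split_ifs <;> simp_all [pvRowOf, pvTable]

-- ===== VERDICT (by name: the statement is the Claim_ definition above) =====
theorem generate_value_driver_map_spec : Claim_equal_generate_value_driver_map := by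
  intro pain_points _
  show generate_value_driver_map pain_points = generate_value_driver_map_alt pain_points
  rw [generate_value_driver_map, pv_step_eq, pv_foldl_map]
  simp [generate_value_driver_map_alt, pv_zip_map]
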